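-- pv_equiv track=rewrite | github.com/ifong6/omnigence-ai | app/core/aggregation_agent.py | _compute_overall_status
-- ===== SOURCE A (Python) =====
-- from typing import Any, Dict, List, Tuple, Literal
--
-- def _compute_overall_status(statuses: List[str]) -> Literal["success", "partial", "error", "empty"]:
--     if any(s == "success" for s in statuses) and not any(s == "error" for s in statuses):
--         return "success"
--     if any(s in ("success", "partial") for s in statuses):
--         return "partial"
--     if any(s == "error" for s in statuses):
--         return "error"
--     return "empty"
-- ===== SOURCE B (Python) =====
-- def _step(state, s):
--     # 5-state DFA on the status lattice; "mixed" = error seen together with success/partial.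
--     if s == "success":
--         return "mixed" if state in ("error", "mixed") else "success"
--     if s == "error":
--         return "error" if state in ("empty", "error") else "mixed"
--     if s == "partial":
--         if state in ("error", "mixed"):
--             return "mixed"
--         return "success" if state == "success" else "partial"
--     return state
--
-- def _compute_overall_status(statuses):
--     state = "empty"
--     for s in statuses:
--         state = _step(state, s)
--     return "partial" if state == "mixed" else state
-- ===== Notes on version B (the rewrite author's own statement) =====
-- stated objective: alternative
-- what changed: Replaces the four any() scans and the four-branch return ladder with a single fold of a 5-state status-lattice automaton (empty/success/partial/error/mixed) whose transition function absorbs each status, mapping the final 'mixed' state to 'partial'; no boolean-flag ladder remains.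
import Mathlib
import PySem

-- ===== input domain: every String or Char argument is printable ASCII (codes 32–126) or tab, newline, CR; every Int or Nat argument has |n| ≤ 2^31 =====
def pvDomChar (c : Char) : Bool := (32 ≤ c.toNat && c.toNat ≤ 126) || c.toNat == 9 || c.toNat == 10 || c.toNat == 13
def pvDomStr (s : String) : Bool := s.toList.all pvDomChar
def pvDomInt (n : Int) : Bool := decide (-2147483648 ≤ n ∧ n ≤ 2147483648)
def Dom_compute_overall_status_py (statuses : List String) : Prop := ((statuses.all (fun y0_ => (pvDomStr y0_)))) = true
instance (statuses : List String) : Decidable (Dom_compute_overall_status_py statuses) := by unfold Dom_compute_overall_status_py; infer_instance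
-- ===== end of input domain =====

-- B replaces A's four any() scans + branch ladder with one fold of a 5-state status-lattice DFA (alternative decomposition, no speed claim).

-- ===== PORT A =====
def compute_overall_status_py (statuses : List String) : String :=
  if statuses.any (fun s => s == "success") && !(statuses.any (fun s => s == "error")) then "success"
  else if statuses.any (fun s => s == "success" || s == "partial") then "partial"
  else if statuses.any (fun s => s == "error") then "error"
  else "empty"

-- ===== PORT B =====
-- 5-state DFA on the status lattice; "mixed" = error seen together with success/partial.
def step_status (state s : String) : String :=
  if s == "success" then
    (if state == "error" || state == "mixed" then "mixed" else "success")
  else if s == "error" then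
    (if state == "empty" || state == "error" then "error" else "mixed")
  else if s == "partial" then
    (if state == "error" || state == "mixed" then "mixed"
     else if state == "success" then "success" else "partial")
  else state

def compute_overall_status_py_alt (statuses : List String) : String :=
  let st := statuses.foldl step_status "empty"
  if st == "mixed" then "partial" else st

-- ===== PRECONDITION & SPEC =====
def Spec_compute_overall_status_py (statuses : List String) (out : String) : Prop := out = compute_overall_status_py_alt statuses
instance (statuses : List String) (out : String) : Decidable (Spec_compute_overall_status_py statuses out) := by unfold Spec_compute_overall_status_py; infer_instance

-- ===== CLAIM (what is proved, stated in full; the proofs are below) =====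
def Claim_equal_compute_overall_status_py : Prop := ∀ (statuses : List String), Dom_compute_overall_status_py statuses → Spec_compute_overall_status_py statuses (compute_overall_status_py statuses)

-- ===== LEMMAS AND PROOFS =====

-- abstraction: the DFA state reached is determined by which of the three flags have been seen
def st_of_flags (a b c : Bool) : String :=
  if b then (if a || c then "mixed" else "error")
  else if a then "success"
  else if c then "partial"
  else "empty"

lemma step_st_of_flags (a b c : Bool) (s : String) :
    step_status (st_of_flags a b c) s
      = st_of_flags (a || (s == "success")) (b || (s == "error")) (c || (s == "partial")) := by
  unfold step_status st_of_flags
  by_cases h1 : s = "success"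
  · subst h1; cases a <;> cases b <;> cases c <;> decide
  · by_cases h2 : s = "error"
    · subst h2; cases a <;> cases b <;> cases c <;> decide
    · by_cases h3 : s = "partial"
      · subst h3; cases a <;> cases b <;> cases c <;> decide
      · simp [h1, h2, h3]

lemma foldl_st_of_flags (statuses : List String) (a b c : Bool) :
    statuses.foldl step_status (st_of_flags a b c)
      = st_of_flags (a || statuses.any (fun s => s == "success"))
                    (b || statuses.any (fun s => s == "error"))
                    (c || statuses.any (fun s => s == "partial")) := by
  induction statuses generalizing a b c with
  | nil => simp
  | cons h t ih =>
    rw [List.foldl_cons, step_st_of_flags, ih]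
    simp [Bool.or_assoc]

theorem compute_overall_status_py_spec : Claim_equal_compute_overall_status_py := by
  intro statuses hdom
  clear hdom
  unfold Spec_compute_overall_status_py compute_overall_status_py compute_overall_status_py_alt
  have h0 : ("empty" : String) = st_of_flags false false false := by decide
  rw [h0, foldl_st_of_flags]
  have hsp : statuses.any (fun s => s == "success" || s == "partial")
      = (statuses.any (fun s => s == "success") || statuses.any (fun s => s == "partial")) := by
    induction statuses with
    | nil => rfl
    | cons h t ih => simp [List.any_cons, ih]; cases h == "success" <;> cases h == "partial" <;> simp
  rw [hsp]
  cases statuses.any (fun s => s == "success") <;>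
    cases statuses.any (fun s => s == "error") <;>
    cases statuses.any (fun s => s == "partial") <;> decide
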